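-- pv_equiv track=rewrite | github.com/Lseonghak/IRIS | stereo/main.py | find_extreme_points
-- ===== SOURCE A (Python) =====
-- def find_extreme_points(contours):
--     leftmost = tuple(contours[0][0][0])
--     rightmost = tuple(contours[0][0][0])
--     for contour in contours:
--         for point in contour:
--             if point[0][0] < leftmost[0]:
--                 leftmost = tuple(point[0])
--             if point[0][0] > rightmost[0]:
--                 rightmost = tuple(point[0])
--     return leftmost, rightmost
-- ===== SOURCE B (Python) =====
-- def find_extreme_points(contours):
--     points = [point for contour in contours for point in contour]
--     leftmost = min(points, key=lambda p: p[0][0])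
--     rightmost = max(points, key=lambda p: p[0][0])
--     return tuple(leftmost[0]), tuple(rightmost[0])
-- ===== Notes on version B (the rewrite author's own statement) =====
-- stated objective: idiomatic
-- what changed: Replaces the combined two-extreme tracking loop seeded from contours[0][0][0] with a flatten-then-reduce decomposition: one comprehension gathers all points and builtins min/max with key p[0][0] (first-occurrence on ties, matching A's strict-inequality first-wins) pick the extremes.
-- outside the precondition, e.g. on find_extreme_points([[[[1, 2, 3]]]]): A returns ((1, 2, 3), (1, 2, 3)), B returns ((1, 2, 3), (1, 2, 3))
import Mathlib
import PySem

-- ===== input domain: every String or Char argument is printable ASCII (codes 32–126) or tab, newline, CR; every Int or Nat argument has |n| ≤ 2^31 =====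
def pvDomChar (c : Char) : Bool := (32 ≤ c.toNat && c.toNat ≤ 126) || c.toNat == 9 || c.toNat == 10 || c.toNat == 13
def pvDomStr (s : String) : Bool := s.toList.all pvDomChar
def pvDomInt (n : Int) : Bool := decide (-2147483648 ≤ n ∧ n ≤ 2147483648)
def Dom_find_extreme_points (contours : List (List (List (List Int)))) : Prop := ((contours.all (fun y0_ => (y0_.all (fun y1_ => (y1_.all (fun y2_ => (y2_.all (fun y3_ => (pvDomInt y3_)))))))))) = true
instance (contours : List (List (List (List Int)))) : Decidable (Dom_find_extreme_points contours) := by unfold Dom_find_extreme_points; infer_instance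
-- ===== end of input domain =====

-- B replaces A's combined extreme-tracking loop with flatten-all-points then two first-occurrence min/max reductions (idiomatic; same cost).


-- tuple(l) of a coordinate list, as the (Int × Int) it is on Pre_-shaped input
def pvPair (l : List Int) : Int × Int := (l.headI, l.getD 1 0)

-- ===== PORT A =====
def find_extreme_points (contours : List (List (List (List Int)))) : (Int × Int) × (Int × Int) :=
  let first : List Int := ((contours.headI).headI).headI
  contours.foldl (fun st contour =>
    contour.foldl (fun st point =>
      let st := if point.headI.headI < st.1.1 then (pvPair point.headI, st.2) else st
      let st := if point.headI.headI > st.2.1 then (st.1, pvPair point.headI) else st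
      st) st) (pvPair first, pvPair first)

-- ===== PORT B =====
def find_extreme_points_alt (contours : List (List (List (List Int)))) : (Int × Int) × (Int × Int) :=
  let points := contours.flatMap id
  let key : List (List Int) → Int := fun p => p.headI.headI
  match PySem.List.min? points key, PySem.List.max? points key with
  | some lm, some rm => (pvPair lm.headI, pvPair rm.headI)
  | _, _ => ((0, 0), (0, 0))  -- unreachable under Pre_ (Python's min/max raise on an empty sequence)

-- ===== PRECONDITION & SPEC =====
-- x-coordinate of a point, point[0][0]
def pvX (p : List (List Int)) : Int := p.headI.headI
-- Pre_ requires nonempty contours[0] and nonempty point/coordinate lists (else Python raises IndexError),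
-- and length exactly 2 for the coordinate lists of the selected leftmost and rightmost points (the first
-- point attaining the minimal/maximal x): on other lengths A returns a tuple that is not a pair, i.e. not
-- a value of the declared type (Int × Int) × (Int × Int).
def Pre_find_extreme_points (contours : List (List (List (List Int)))) : Prop :=
  contours ≠ [] ∧ contours.headI ≠ [] ∧
  (∀ p ∈ contours.flatMap id, p ≠ [] ∧ p.headI ≠ []) ∧
  (∃ i : Fin (contours.flatMap id).length, ((contours.flatMap id).get i).headI.length = 2 ∧
    ∀ j : Fin (contours.flatMap id).length,
      (j < i → pvX ((contours.flatMap id).get i) < pvX ((contours.flatMap id).get j)) ∧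
      pvX ((contours.flatMap id).get i) ≤ pvX ((contours.flatMap id).get j)) ∧
  (∃ i : Fin (contours.flatMap id).length, ((contours.flatMap id).get i).headI.length = 2 ∧
    ∀ j : Fin (contours.flatMap id).length,
      (j < i → pvX ((contours.flatMap id).get j) < pvX ((contours.flatMap id).get i)) ∧
      pvX ((contours.flatMap id).get j) ≤ pvX ((contours.flatMap id).get i))
instance (contours : List (List (List (List Int)))) : Decidable (Pre_find_extreme_points contours) := by
  unfold Pre_find_extreme_points; infer_instance
def pvWitness_find_extreme_points : List (List (List (List Int))) := [[[[0, 0]], [[3, 4]]]]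
def Spec_find_extreme_points (contours : List (List (List (List Int)))) (out : (Int × Int) × (Int × Int)) : Prop := out = find_extreme_points_alt contours
instance (contours : List (List (List (List Int)))) (out : (Int × Int) × (Int × Int)) : Decidable (Spec_find_extreme_points contours out) := by unfold Spec_find_extreme_points; infer_instance

-- ===== CLAIM (what is proved, stated in full; the proofs are below) =====
def Claim_equal_find_extreme_points : Prop := ∀ (contours : List (List (List (List Int)))), Dom_find_extreme_points contours → Pre_find_extreme_points contours → Spec_find_extreme_points contours (find_extreme_points contours)

-- ===== LEMMAS AND PROOFS =====

-- A's loop body and the plain point-valued running extremes it mirrors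
def pvStepA (st : (Int × Int) × (Int × Int)) (point : List (List Int)) : (Int × Int) × (Int × Int) :=
  let st := if point.headI.headI < st.1.1 then (pvPair point.headI, st.2) else st
  let st := if point.headI.headI > st.2.1 then (st.1, pvPair point.headI) else st
  st
def pvMinStep (m p : List (List Int)) : List (List Int) := if p.headI.headI < m.headI.headI then p else m
def pvMaxStep (m p : List (List Int)) : List (List Int) := if m.headI.headI < p.headI.headI then p else m

lemma foldl_stepA (l : List (List (List Int))) (a b : List (List Int)) :
    l.foldl pvStepA (pvPair a.headI, pvPair b.headI)
      = (pvPair (l.foldl pvMinStep a).headI, pvPair (l.foldl pvMaxStep b).headI) := by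
  induction l generalizing a b with
  | nil => rfl
  | cons x t ih =>
    have hstep : pvStepA (pvPair a.headI, pvPair b.headI) x
        = (pvPair (pvMinStep a x).headI, pvPair (pvMaxStep b x).headI) := by
      simp only [pvStepA, pvMinStep, pvMaxStep, pvPair, gt_iff_lt]
      split_ifs <;> rfl
    simp only [List.foldl_cons, hstep, ih]

-- a fold carrying `some`-state equals `some` of the plain fold
lemma foldl_opt_gen {α : Type} (g : α → α → α) (f : Option α → α → Option α)
    (hf : ∀ m x, f (some m) x = some (g m x)) :
    ∀ (t : List α) (m : α), t.foldl f (some m) = some (t.foldl g m) := by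
  intro t
  induction t with
  | nil => intro m; rfl
  | cons x t ih => intro m; simp only [List.foldl_cons, hf]; exact ih _

lemma min?_cons (h : List (List Int)) (t : List (List (List Int))) :
    PySem.List.min? (h :: t) (fun p => p.headI.headI) = some (t.foldl pvMinStep h) := by
  simp only [PySem.List.min?, List.foldl_cons]
  exact foldl_opt_gen pvMinStep _ (fun m x => by simp only [pvMinStep, apply_ite]; split_ifs <;> rfl) t h

lemma max?_cons (h : List (List Int)) (t : List (List (List Int))) :
    PySem.List.max? (h :: t) (fun p => p.headI.headI) = some (t.foldl pvMaxStep h) := by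
  simp only [PySem.List.max?, List.foldl_cons]
  exact foldl_opt_gen pvMaxStep _ (fun m x => by simp only [pvMaxStep, apply_ite]; split_ifs <;> rfl) t h

-- ===== VERDICT (by name: the statement is the Claim_ definition above) =====
theorem find_extreme_points_spec : Claim_equal_find_extreme_points := by
  intro contours _hdom hpre
  obtain ⟨hne, hfne, -, -, -⟩ := hpre
  obtain ⟨c0, rest, rfl⟩ : ∃ c0 rest, contours = c0 :: rest :=
    ⟨contours.headI, contours.tail, (List.cons_head!_tail (by simpa using hne)).symm⟩
  obtain ⟨h, c0t, rfl⟩ : ∃ h c0t, c0 = h :: c0t :=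
    ⟨c0.headI, c0.tail, (List.cons_head!_tail (by simpa using hfne)).symm⟩
  show find_extreme_points _ = find_extreme_points_alt _
  have hA : find_extreme_points ((h :: c0t) :: rest)
      = ((h :: c0t) :: rest).foldl (fun st c => c.foldl pvStepA st)
          (pvPair h.headI, pvPair h.headI) := rfl
  have hflat : ((h :: c0t) :: rest).flatten = h :: (c0t ++ rest.flatten) := by simp
  have hfirst : pvStepA (pvPair h.headI, pvPair h.headI) h = (pvPair h.headI, pvPair h.headI) := by
    simp [pvStepA, pvPair]
  rw [hA, ← List.foldl_flatten, hflat]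
  simp only [List.foldl_cons, hfirst, foldl_stepA]
  -- B side
  have hB : find_extreme_points_alt ((h :: c0t) :: rest)
      = match PySem.List.min? (((h :: c0t) :: rest).flatten) (fun p => p.headI.headI),
              PySem.List.max? (((h :: c0t) :: rest).flatten) (fun p => p.headI.headI) with
        | some lm, some rm => (pvPair lm.headI, pvPair rm.headI)
        | _, _ => ((0, 0), (0, 0)) := by
    simp only [find_extreme_points_alt, List.flatMap_id]
  rw [hB, hflat, min?_cons, max?_cons]
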